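-- pv_equiv track=rewrite | github.com/HHansi/Embed2Detect | data_analysis/groundtruth_processor.py | get_combined_gt
-- ===== SOURCE A (Python) =====
-- def get_combined_gt(gt):
--     """
--     Combine the GT labels of multiple events available at a time frame into single event representation.
--
--     parameters
--     -----------
--     :param gt: object
--         Dictionary of GT returned by load_GT
--     :return: object
--         Dictionary of combined GT
--     """
--     combined_gt = dict()
--     for time_frame in gt.keys():
--         gt_events = gt[time_frame]
--         combined_gt_event = gt_events[0]
--
--         for event in gt_events[1:]:
--             temp = []
--             for duplicate in event:
--                 for combined_event in combined_gt_event: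
--                     temp.append(combined_event + duplicate)
--             combined_gt_event = temp
--
--         # even though there is 1 event, it is added to a list to preserve consistency with general evaluation methods
--         events = [combined_gt_event]
--         combined_gt[time_frame] = events
--     return combined_gt
-- ===== SOURCE B (Python) =====
-- def _combine(events):
--     head = events[0]
--     rest = events[1:]
--     if not rest:
--         return list(head)
--     return [h + r for r in _combine(rest) for h in head]
--
--
-- def get_combined_gt(gt):
--     return {tf: [_combine(events)] for tf, events in gt.items()}
-- ===== Notes on version B (the rewrite author's own statement) =====
-- stated objective: alternative
-- what changed: Per time frame, A builds the combined labels with an iterative accumulator fold (rebuilding a temp list per extra event); B computes them by recursion on the event list as a suffix product, concatenating each head label onto every recursively combined suffix.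
import Mathlib
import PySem

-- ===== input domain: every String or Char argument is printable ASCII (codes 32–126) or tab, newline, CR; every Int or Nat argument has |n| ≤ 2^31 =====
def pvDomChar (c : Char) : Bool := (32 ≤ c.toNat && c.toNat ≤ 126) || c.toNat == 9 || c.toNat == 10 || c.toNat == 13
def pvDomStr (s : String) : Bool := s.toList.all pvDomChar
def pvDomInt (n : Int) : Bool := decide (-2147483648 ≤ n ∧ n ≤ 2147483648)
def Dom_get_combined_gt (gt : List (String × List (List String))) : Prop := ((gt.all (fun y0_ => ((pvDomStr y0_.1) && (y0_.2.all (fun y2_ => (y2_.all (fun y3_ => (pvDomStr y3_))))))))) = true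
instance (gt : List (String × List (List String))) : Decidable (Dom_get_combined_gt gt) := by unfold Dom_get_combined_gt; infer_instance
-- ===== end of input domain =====

-- B replaces A's per-frame incremental accumulator loop by a recursive suffix-product
-- (recursion on the event list instead of the iterative fold); objective: alternative, same cost.
-- Equivalence is about return values; neither program mutates its argument.

-- ===== PORT A =====
-- 'temp.append(combined_event + duplicate)' for each combined_event, for each duplicate
def pvStepA (acc : List String) (event : List String) : List String :=
  event.foldl (fun temp dup => acc.foldl (fun t c => t ++ [c ++ dup]) temp) []

-- the per-time-frame body: gt_events[0] then the fold over gt_events[1:]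
def pvCombineA (gt_events : List (List String)) : List String :=
  match PySem.List.pyGet? gt_events 0 with
  | none => []   -- gt_events[0] raises IndexError in Python: excluded by Pre_
  | some first => (PySem.List.slice gt_events (some 1) none).foldl pvStepA first

def get_combined_gt (gt : List (String × List (List String))) : List (String × List (List String)) :=
  -- the argument is Python's dict: build it once, iterate its keys and look each one up
  ((PySem.Dict.ofList gt).keys.foldl (fun acc time_frame =>
      -- gt[time_frame]: time_frame ∈ keys, so the lookup always succeeds
      acc.insert time_frame [pvCombineA ((PySem.Dict.ofList gt).getD time_frame [])])
    PySem.Dict.empty).items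

-- ===== PORT B =====
-- _combine: recursion on the tail; an events list with no event raises IndexError in Python (excluded by Pre_)
def pvCombineB : List (List String) → List String
  | [] => []
  | [head] => head
  | head :: e :: rest => (pvCombineB (e :: rest)).flatMap (fun r => head.map (fun h => h ++ r))

def get_combined_gt_alt (gt : List (String × List (List String))) : List (String × List (List String)) :=
  (PySem.Dict.ofList gt).items.map (fun p => (p.1, [pvCombineB p.2]))

-- ===== PRECONDITION & SPEC =====
-- Pre_: every time frame of the dict carries at least one event; where a frame carries none,
-- both A and B raise IndexError on the first-event lookup.
def Pre_get_combined_gt (gt : List (String × List (List String))) : Prop :=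
  ∀ v ∈ (PySem.Dict.ofList gt).values, v ≠ []
instance (gt : List (String × List (List String))) : Decidable (Pre_get_combined_gt gt) := by unfold Pre_get_combined_gt; infer_instance

def pvWitness_get_combined_gt : (List (String × List (List String))) :=
  [("t1", [["a", "b"], ["x"]]), ("t2", [["c"]])]

def Spec_get_combined_gt (gt : List (String × List (List String))) (out : List (String × List (List String))) : Prop := out = get_combined_gt_alt gt
instance (gt : List (String × List (List String))) (out : List (String × List (List String))) : Decidable (Spec_get_combined_gt gt out) := by unfold Spec_get_combined_gt; infer_instance

-- ===== CLAIM (what is proved, stated in full; the proofs are below) =====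
def Claim_equal_get_combined_gt : Prop := ∀ (gt : List (String × List (List String))), Dom_get_combined_gt gt → Pre_get_combined_gt gt → Spec_get_combined_gt gt (get_combined_gt gt)

-- ===== LEMMAS AND PROOFS =====

-- one step of A's accumulator loop, as a flatMap
theorem pvStepA_eq (acc event : List String) :
    pvStepA acc event = event.flatMap (fun d => acc.map (fun c => c ++ d)) := by
  unfold pvStepA
  have h : ∀ (temp : List String) (dup : String),
      acc.foldl (fun t c => t ++ [c ++ dup]) temp = temp ++ acc.map (fun c => c ++ dup) :=
    fun temp dup => PySem.List.foldl_append_singleton_eq_map ..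
  simp only [h]
  simpa using PySem.List.foldl_append_eq_flatMap (fun d => acc.map (fun c => c ++ d)) event []

-- absorbing one A-step into B's recursion
theorem pvCombineB_step (a e : List String) (rs : List (List String)) :
    pvCombineB (pvStepA a e :: rs) = (pvCombineB (e :: rs)).flatMap (fun r => a.map (fun c => c ++ r)) := by
  induction rs with
  | nil => simp [pvCombineB, pvStepA_eq]
  | cons f fs _ =>
    show pvCombineB (pvStepA a e :: f :: fs) = _
    simp only [pvCombineB, pvStepA_eq, List.flatMap_assoc, List.map_flatMap, List.flatMap_map,
      List.map_map]
    simp [Function.comp_def, String.append_assoc]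

-- A's per-frame fold equals B's recursion
theorem pvCombine_eq (first : List String) (rest : List (List String)) :
    rest.foldl pvStepA first = pvCombineB (first :: rest) := by
  induction rest generalizing first with
  | nil => simp [pvCombineB]
  | cons e rs ih =>
    rw [List.foldl_cons, ih, pvCombineB_step]
    rcases rs with _ | ⟨f, fs⟩ <;> simp [pvCombineB]

theorem pvCombineA_eq (events : List (List String)) (h : events ≠ []) :
    pvCombineA events = pvCombineB events := by
  rcases events with _ | ⟨first, rest⟩
  · exact absurd rfl h
  · unfold pvCombineA
    simp only [pysem]
    exact pvCombine_eq first rest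

-- building a dict by inserting fresh keys appends the items in order
theorem pvFoldl_insert_items (G : String × List (List String) → List (List String))
    (ps : List (String × List (List String))) (acc : PySem.Dict String (List (List String)))
    (hnd : (ps.map Prod.fst).Nodup) (hfresh : ∀ p ∈ ps, ¬ acc.contains p.1) :
    (ps.foldl (fun acc p => acc.insert p.1 (G p)) acc).items
      = acc.items ++ ps.map (fun p => (p.1, G p)) := by
  induction ps generalizing acc with
  | nil => simp
  | cons p ps ih =>
    simp only [List.foldl_cons, List.map_cons] at *
    rw [List.nodup_cons] at hnd
    have hfp : ¬ acc.contains p.1 := hfresh p (by simp)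
    rw [ih _ hnd.2 ?_, PySem.Dict.items_insert_of_not_contains _ _ (by simpa using hfp)]
    · simp
    · intro q hq
      have hk : (acc.insert p.1 (G p)).keys = acc.keys ++ [p.1] :=
        PySem.Dict.keys_insert_of_not_contains _ _ (by simpa using hfp)
      rw [PySem.Dict.contains_iff_mem_keys, hk]
      have hq1 : q.1 ≠ p.1 := fun he => hnd.1 (he ▸ List.mem_map_of_mem hq)
      simp only [List.mem_append, List.mem_singleton]
      push Not
      exact ⟨by rw [← PySem.Dict.contains_iff_mem_keys]; exact hfresh q (by simp [hq]), hq1⟩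

-- ===== VERDICT (by name: the statement is the Claim_ definition above) =====
theorem get_combined_gt_spec : Claim_equal_get_combined_gt := by
  intro gt _ hpre
  unfold Pre_get_combined_gt at hpre
  show get_combined_gt gt = get_combined_gt_alt gt
  unfold get_combined_gt get_combined_gt_alt
  have hnd : (PySem.Dict.ofList gt).keys.Nodup := PySem.Dict.nodup_keys_ofList gt
  generalize PySem.Dict.ofList gt = d at hpre hnd ⊢
  have hkeys : d.keys = d.items.map Prod.fst := rfl
  rw [hkeys, List.foldl_map]
  have hstep : ∀ (acc : PySem.Dict String (List (List String))) (p : String × List (List String)),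
      p ∈ d.items → acc.insert p.1 [pvCombineA (d.getD p.1 [])] = acc.insert p.1 [pvCombineB p.2] := by
    intro acc p hp
    have hv : p.2 ∈ d.values := by
      unfold PySem.Dict.values; exact List.mem_map_of_mem hp
    rw [PySem.Dict.getD_of_mem_items (d := d) (by simpa using hp) hnd,
      pvCombineA_eq p.2 (hpre p.2 hv)]
  rw [PySem.List.foldl_congr_mem (l := d.items)
      (init := (PySem.Dict.empty : PySem.Dict String (List (List String))))
      (f := fun acc p => acc.insert p.1 [pvCombineA (d.getD p.1 [])])
      (g := fun acc p => acc.insert p.1 [pvCombineB p.2]) (fun acc p hp => hstep acc p hp)]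
  rw [pvFoldl_insert_items (fun p => [pvCombineB p.2]) d.items PySem.Dict.empty
      (by rw [← hkeys]; exact hnd) (by intro p _; simp [PySem.Dict.contains_empty])]
  simp [PySem.Dict.empty]
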